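-- pv_equiv track=rewrite | github.com/Stepan-af/School | school/16/2.py | count_calls
-- ===== SOURCE A (Python) =====
-- def count_calls(n):
--     if n < 1:
--         return 1  # Базовый случай
--
--     # Инициализация списка dp
--     dp = [0] * (n + 1)
--     dp[0] = 1  # F(0) требует 1 вызов
--
--     for k in range(1, n + 1):
--         if k % 100 == 0 and k > 1:
--             # F(k) = F(k-1) * F(k-2) + F(1)
--             dp[k] = 1 + dp[k - 1] + dp[k - 2] + dp[1]
--         elif k > 1:
--             # F(k) = k * F(k-1)
--             dp[k] = 1 + dp[k - 1]
--         else: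
--             # F(1) = 1 * F(0) = 1 * 1 = 1 → 1 вызов (F(1)) + 1 вызов (F(0))
--             dp[k] = 1  # F(1) требует 2 вызова (F(1) и F(0))
--
--     return dp[n]
-- ===== SOURCE B (Python) =====
-- def count_calls(n):
--     # Closed form: inside each block of 100 the count grows by 1 per step,
--     # and block starts satisfy a(m) = 2*a(m-1) + 199, giving a(m) = 199*(2^m - 1).
--     if n < 1:
--         return 1
--     m, j = divmod(n, 100)
--     if m == 0:
--         return n
--     return 199 * ((1 << m) - 1) + j
-- ===== Notes on version B (the rewrite author's own statement) =====
-- stated objective: faster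
-- what changed: Replaced the O(n) dp-array loop by a closed form derived from the recurrence (within a block of 100 the count grows by 1 per step; block starts satisfy a(m)=2*a(m-1)+199, so a(m)=199*(2^m-1)), computed with divmod and a shift.
import Mathlib
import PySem

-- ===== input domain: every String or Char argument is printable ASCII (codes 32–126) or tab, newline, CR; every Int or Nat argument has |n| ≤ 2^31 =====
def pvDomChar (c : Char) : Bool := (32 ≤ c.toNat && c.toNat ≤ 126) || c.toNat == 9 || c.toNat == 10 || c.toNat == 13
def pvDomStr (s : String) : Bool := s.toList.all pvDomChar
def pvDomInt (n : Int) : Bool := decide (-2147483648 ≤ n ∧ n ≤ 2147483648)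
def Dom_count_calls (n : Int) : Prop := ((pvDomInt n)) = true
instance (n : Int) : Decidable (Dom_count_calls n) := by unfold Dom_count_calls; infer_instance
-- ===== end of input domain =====

-- B replaces A's O(n) dp loop by a closed form (199*(2^m - 1) + j at n = 100*m + j): faster.

-- ===== PORT A =====
-- one iteration of A's for-loop; list indices are nonnegative and in range here,
-- so pyGetD / List.set are exact for Python's dp[...] reads and writes
def ccStep (dp : List Int) (k : Int) : List Int :=
  if PySem.Int.mod k 100 == 0 && k > 1 then
    dp.set k.toNat (1 + PySem.List.pyGetD dp (k - 1) 0 + PySem.List.pyGetD dp (k - 2) 0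
      + PySem.List.pyGetD dp 1 0)
  else if k > 1 then
    dp.set k.toNat (1 + PySem.List.pyGetD dp (k - 1) 0)
  else
    dp.set k.toNat 1

def count_calls (n : Int) : Int :=
  if n < 1 then 1
  else
    let dp0 := (List.replicate (n + 1).toNat 0).set 0 1   -- dp = [0]*(n+1); dp[0] = 1
    let dp := (PySem.List.pyRange 1 (n + 1) 1).foldl ccStep dp0
    PySem.List.pyGetD dp n 0                              -- dp[n], index in range

-- ===== PORT B =====
def count_calls_alt (n : Int) : Int :=
  if n < 1 then 1
  else
    let m := PySem.Int.floordiv n 100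
    let j := PySem.Int.mod n 100
    if m = 0 then n
    else 199 * (2 ^ m.toNat - 1) + j    -- (1 << m) - 1; m ≥ 1 here so toNat is exact

-- ===== PRECONDITION & SPEC =====
def Spec_count_calls (n : Int) (out : Int) : Prop := out = count_calls_alt n
instance (n : Int) (out : Int) : Decidable (Spec_count_calls n out) := by unfold Spec_count_calls; infer_instance

-- ===== CLAIM (what is proved, stated in full; the proofs are below) =====
def Claim_equal_count_calls : Prop := ∀ (n : Int), Dom_count_calls n → Spec_count_calls n (count_calls n)

-- ===== LEMMAS AND PROOFS =====

-- the recurrence A's dp array tabulates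
-- the recurrence A's dp array tabulates (dp[1] = 1 is inlined)
def ccG : Nat → Int
  | 0 => 1
  | 1 => 1
  | (k + 2) => if (k + 2) % 100 = 0 then 1 + ccG (k + 1) + ccG k + 1 else 1 + ccG (k + 1)

-- the closed form B computes
def ccF (k : Nat) : Int :=
  if k = 0 then 1
  else if k < 100 then (k : Int)
  else 199 * (2 ^ (k / 100) - 1) + ((k % 100 : Nat) : Int)

lemma ccF_small (k : Nat) (h1 : k ≠ 0) (h2 : k < 100) : ccF k = (k : Int) := by
  rw [ccF, if_neg h1, if_pos h2]

lemma ccF_big (k : Nat) (h : 100 ≤ k) :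
    ccF k = 199 * (2 ^ (k / 100) - 1) + ((k % 100 : Nat) : Int) := by
  rw [ccF, if_neg (by omega), if_neg (by omega)]

lemma ccG_eq_ccF : ∀ k, ccG k = ccF k := by
  intro k
  induction k using Nat.strong_induction_on with
  | _ k ih =>
    match k with
    | 0 => norm_num [ccG, ccF]
    | 1 => norm_num [ccG, ccF]
    | (k + 2) =>
      rw [ccG, ih (k + 1) (by omega), ih k (by omega)]
      by_cases h : (k + 2) % 100 = 0
      · rw [if_pos h]
        by_cases h1 : k + 2 = 100
        · have hk : k = 98 := by omega
          subst hk
          rw [ccF_small 99 (by omega) (by omega), ccF_small 98 (by omega) (by omega),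
            ccF_big 100 (by omega)]
          norm_num
        · have hk2 : 200 ≤ k + 2 := by omega
          have e1 : (k + 1) / 100 = (k + 2) / 100 - 1 := by omega
          have e2 : k / 100 = (k + 2) / 100 - 1 := by omega
          have e3 : (k + 1) % 100 = 99 := by omega
          have e4 : k % 100 = 98 := by omega
          rw [ccF_big (k + 1) (by omega), ccF_big k (by omega), ccF_big (k + 2) (by omega),
            e1, e2, e3, e4, h]
          have hpow : (2 : Int) ^ ((k + 2) / 100) = 2 * 2 ^ ((k + 2) / 100 - 1) := by
            rw [← pow_succ']
            congr 1
            omega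
          rw [hpow]
          norm_num
          ring
      · rw [if_neg h]
        by_cases hs : k + 2 < 100
        · rw [ccF_small (k + 1) (by omega) (by omega), ccF_small (k + 2) (by omega) (by omega)]
          push_cast
          ring
        · have e1 : (k + 1) / 100 = (k + 2) / 100 := by omega
          have e2 : (k + 2) % 100 = (k + 1) % 100 + 1 := by omega
          rw [ccF_big (k + 1) (by omega), ccF_big (k + 2) (by omega), e1, e2]
          push_cast
          ring

-- loop invariant for A's fold: after processing range(1, K+1) the dp list has
-- unchanged length and holds ccG at every index ≤ K
lemma cc_inv (n : Int) (hn : 1 ≤ n) (K : Nat) (hK : (K : Int) ≤ n) :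
    (((PySem.List.pyRange 1 ((K : Int) + 1) 1).foldl ccStep
        ((List.replicate (n + 1).toNat 0).set 0 1)).length = (n + 1).toNat)
    ∧ (∀ i : Nat, i ≤ K →
        ((PySem.List.pyRange 1 ((K : Int) + 1) 1).foldl ccStep
          ((List.replicate (n + 1).toNat 0).set 0 1)).getD i 0 = ccG i) := by
  induction K with
  | zero =>
    rw [PySem.List.pyRange_one_eq_nil (by omega)]
    simp only [List.foldl_nil]
    constructor
    · simp
    · intro i hi
      interval_cases i
      have h1 : (0 : Nat) < ((List.replicate (n + 1).toNat (0 : Int))).length := by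
        simp; omega
      rw [List.getD, List.getElem?_set_self h1]
      simp [ccG]
  | succ K ih =>
    have hK' : (K : Int) ≤ n := by push_cast at hK ⊢; omega
    obtain ⟨ihlen, ihval⟩ := ih hK'
    have hcast : (((K + 1 : Nat)) : Int) + 1 = ((K : Int) + 1) + 1 := by push_cast; ring
    have hsplit : PySem.List.pyRange 1 ((K : Int) + 1 + 1) 1
        = PySem.List.pyRange 1 ((K : Int) + 1) 1 ++ [(K : Int) + 1] := by
      have := PySem.List.pyRange_one_succ_right (a := 1) (b := (K : Int) + 1) (by omega)
      simpa using this
    rw [hcast, hsplit, List.foldl_append]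
    simp only [List.foldl_cons, List.foldl_nil]
    set L := (PySem.List.pyRange 1 ((K : Int) + 1) 1).foldl ccStep
      ((List.replicate (n + 1).toNat 0).set 0 1) with hL
    have hlenL : L.length = (n + 1).toNat := ihlen
    have hKlt : K + 1 < L.length := by rw [hlenL]; omega
    match K with
    | 0 =>
      -- k = 1 : third branch, dp[1] = 1
      have hstep : ccStep L ((0 : Int) + 1) = L.set 1 1 := by
        simp [ccStep, PySem.Int.mod]
      rw [show ((0 : Nat) : Int) + 1 = (0 : Int) + 1 by norm_num, hstep]
      refine ⟨by simp [hlenL], ?_⟩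
      intro i hi
      interval_cases i
      · rw [List.getD, List.getElem?_set_ne (by omega)]
        exact ihval 0 (by omega)
      · rw [List.getD, List.getElem?_set_self (by omega)]
        simp [ccG]
    | (K' + 1) =>
      -- k = K' + 2 ≥ 2
      have hk2 : (((K' + 1 : Nat)) : Int) + 1 = (((K' + 2 : Nat) : Int)) := by push_cast; ring
      rw [hk2]
      have hget : ∀ i : Nat, i ≤ K' + 1 →
          PySem.List.pyGetD L ((i : Nat) : Int) 0 = ccG i := by
        intro i hi
        rw [PySem.List.pyGetD_natCast]
        exact ihval i hi
      have hmod : PySem.Int.mod (((K' + 2 : Nat) : Int)) 100 = (((K' + 2) % 100 : Nat) : Int) := by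
        exact_mod_cast PySem.Int.mod_natCast (K' + 2) 100
      by_cases hdiv : (K' + 2) % 100 = 0
      · have hstep : ccStep L (((K' + 2 : Nat) : Int))
            = L.set (K' + 2) (1 + ccG (K' + 1) + ccG K' + 1) := by
          have c1 : (((K' + 2 : Nat) : Int)) - 1 = ((K' + 1 : Nat) : Int) := by push_cast; ring
          have c2 : (((K' + 2 : Nat) : Int)) - 2 = ((K' : Nat) : Int) := by push_cast; ring
          have c3 : (1 : Int) = ((1 : Nat) : Int) := by norm_num
          have hget1 : PySem.List.pyGetD L (1 : Int) 0 = 1 := by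
            rw [c3, hget 1 (by omega)]; simp [ccG]
          simp only [ccStep, hmod, hdiv]
          rw [if_pos (by simp; omega), c1, c2,
            hget (K' + 1) (by omega), hget K' (by omega), hget1]
          congr 1
        rw [hstep]
        refine ⟨by simp [hlenL], ?_⟩
        intro i hi
        rcases Nat.lt_or_ge i (K' + 2) with hlt | hge
        · rw [List.getD, List.getElem?_set_ne (by omega)]
          exact ihval i (by omega)
        · have : i = K' + 2 := by omega
          subst this
          rw [List.getD, List.getElem?_set_self (by omega)]
          simp [ccG, hdiv]
      · have hstep : ccStep L (((K' + 2 : Nat) : Int))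
            = L.set (K' + 2) (1 + ccG (K' + 1)) := by
          have c1 : (((K' + 2 : Nat) : Int)) - 1 = ((K' + 1 : Nat) : Int) := by push_cast; ring
          simp only [ccStep, hmod]
          rw [if_neg (by simp; omega), if_pos (by push_cast; omega), c1,
            hget (K' + 1) (by omega)]
          congr 1
        rw [hstep]
        refine ⟨by simp [hlenL], ?_⟩
        intro i hi
        rcases Nat.lt_or_ge i (K' + 2) with hlt | hge
        · rw [List.getD, List.getElem?_set_ne (by omega)]
          exact ihval i (by omega)
        · have : i = K' + 2 := by omega
          subst this
          rw [List.getD, List.getElem?_set_self (by omega)]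
          simp [ccG, hdiv]

lemma countA_eq (n : Int) (hn : 1 ≤ n) : count_calls n = ccG n.toNat := by
  obtain ⟨t, ht⟩ : ∃ t : Nat, n = (t : Int) := ⟨n.toNat, by omega⟩
  subst ht
  obtain ⟨hlen, hval⟩ := cc_inv (t : Int) hn t (le_refl _)
  rw [count_calls, if_neg (by omega), PySem.List.pyGetD_natCast, Int.toNat_natCast]
  exact hval t (le_refl _)

lemma countB_eq (n : Int) (hn : 1 ≤ n) : count_calls_alt n = ccF n.toNat := by
  have hfd : PySem.Int.floordiv n 100 = ((n.toNat / 100 : Nat) : Int) := by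
    rw [PySem.Int.floordiv_eq_ediv_of_pos (by norm_num)]
    omega
  have hmd : PySem.Int.mod n 100 = ((n.toNat % 100 : Nat) : Int) := by
    rw [PySem.Int.mod_eq_emod_of_pos (by norm_num)]
    omega
  rw [count_calls_alt, if_neg (by omega)]
  simp only [hfd, hmd, ccF]
  by_cases hm : n.toNat / 100 = 0
  · rw [if_pos (by exact_mod_cast congrArg (Nat.cast : Nat → Int) hm), if_neg (by omega),
      if_pos (by omega)]
    omega
  · rw [if_neg (by exact_mod_cast fun h => hm (by exact_mod_cast h)), if_neg (by omega),
      if_neg (by omega)]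
    congr 2

-- ===== VERDICT (by name: the statement is the Claim_ definition above) =====
theorem count_calls_spec : Claim_equal_count_calls := by
  intro n _
  unfold Spec_count_calls
  by_cases hn : n < 1
  · rw [count_calls, count_calls_alt, if_pos hn, if_pos hn]
  · rw [countA_eq n (by omega), countB_eq n (by omega), ccG_eq_ccF]
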